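-- pv_equiv track=rewrite | github.com/yallapragada/rmt | src/rmt_flu.py | map_residue_positions
-- ===== SOURCE A (Python) =====
-- def map_residue_positions(novars, pruned_sequence_length):
--     """ adds positions of novars residues and gives original residue positions
--     """
--     counter = 0
--     i = 0
--     residue_dict = {}
--     distinct_novars = list(set(novars))
--     distinct_novars.sort()
--     while counter < pruned_sequence_length:
--         if (counter in distinct_novars):
--             residue_dict[counter] = i + 1
--             i = i + 2
--         else:
--             residue_dict[counter] = i
--             i = i + 1
--         counter = counter + 1
--     return residue_dict
-- ===== SOURCE B (Python) =====
-- def map_residue_positions(novars, pruned_sequence_length):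
--     """adds positions of novars residues and gives original residue positions"""
--     s = sorted(x for x in set(novars) if x >= 0)
--
--     def rank(c):
--         # number of elements of s that are <= c (hand-rolled bisect_right)
--         lo, hi = 0, len(s)
--         while lo < hi:
--             mid = (lo + hi) // 2
--             if s[mid] <= c:
--                 lo = mid + 1
--             else:
--                 hi = mid
--         return lo
--
--     return {c: c + rank(c) for c in range(pruned_sequence_length)}
-- ===== Notes on version B (the rewrite author's own statement) =====
-- stated objective: faster
-- what changed: Replaces A's left-to-right accumulator loop (running offset i plus a per-position membership scan of the sorted novar list) with a closed-form per-position value: build the sorted distinct nonnegative novars once, then each position c independently gets c plus a binary-search count (bisect_right) of novars <= c, emitted by a dict comprehension.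
import Mathlib
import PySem

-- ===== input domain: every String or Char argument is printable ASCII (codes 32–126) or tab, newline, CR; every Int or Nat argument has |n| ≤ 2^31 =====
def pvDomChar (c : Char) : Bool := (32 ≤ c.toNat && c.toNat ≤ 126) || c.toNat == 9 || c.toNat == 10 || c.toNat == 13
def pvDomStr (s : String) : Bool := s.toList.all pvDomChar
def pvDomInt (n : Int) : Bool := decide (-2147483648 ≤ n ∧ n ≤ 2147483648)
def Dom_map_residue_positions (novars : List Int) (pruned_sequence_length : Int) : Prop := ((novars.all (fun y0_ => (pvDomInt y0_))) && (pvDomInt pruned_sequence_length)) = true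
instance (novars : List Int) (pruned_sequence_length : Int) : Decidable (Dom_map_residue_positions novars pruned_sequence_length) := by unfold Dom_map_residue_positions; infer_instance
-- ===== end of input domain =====

-- B replaces A's left-to-right accumulator loop with a per-position binary search (bisect_right)
-- over the sorted distinct nonnegative novars, giving each value in closed form (faster).


-- ===== PORT A =====
-- the while loop of A: state (counter, i, residue_dict)
def mrpLoop (distinct_novars : List Int) (pruned_sequence_length counter i : Int)
    (residue_dict : PySem.Dict Int Int) : PySem.Dict Int Int :=
  if _h : counter < pruned_sequence_length then
    if distinct_novars.contains counter then
      mrpLoop distinct_novars pruned_sequence_length (counter + 1) (i + 2)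
        (residue_dict.insert counter (i + 1))
    else
      mrpLoop distinct_novars pruned_sequence_length (counter + 1) (i + 1)
        (residue_dict.insert counter i)
  else residue_dict
termination_by (pruned_sequence_length - counter).toNat
decreasing_by all_goals omega

def map_residue_positions (novars : List Int) (pruned_sequence_length : Int) : List (Int × Int) :=
  let distinct_novars := PySem.List.sorted (PySem.Set.ofList novars) (fun x => x) false
  (mrpLoop distinct_novars pruned_sequence_length 0 0 PySem.Dict.empty).items

-- ===== PORT B =====
-- the inner while loop of rank(c): hand-rolled bisect_right; lo ≤ mid < hi always holds,
-- so s[mid] never leaves the list and pyGetD's default is never read (exact port)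
def rankLoop (s : List Int) (c lo hi : Int) : Int :=
  if h : lo < hi then
    let mid := PySem.Int.floordiv (lo + hi) 2
    if PySem.List.pyGetD s mid 0 ≤ c then rankLoop s c (mid + 1) hi
    else rankLoop s c lo mid
  else lo
termination_by (hi - lo).toNat
decreasing_by
  · have := (PySem.Int.floordiv_two_mid_bounds (le_of_lt h)).1
    omega
  · have h2 : PySem.Int.floordiv (lo + hi) 2 < hi :=
      (PySem.Int.floordiv_lt_iff_lt_mul (by omega)).mpr (by omega)
    omega

def map_residue_positions_alt (novars : List Int) (pruned_sequence_length : Int) : List (Int × Int) :=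
  -- s = sorted(x for x in set(novars) if x >= 0)
  let s := PySem.List.sorted ((PySem.Set.ofList novars).filter (fun x => decide (0 ≤ x)))
    (fun x => x) false
  -- {c: c + rank(c) for c in range(pruned_sequence_length)}
  ((PySem.List.pyRange 0 pruned_sequence_length 1).foldl
    (fun d c => d.insert c (c + rankLoop s c 0 (s.length : Int)))
    (PySem.Dict.empty : PySem.Dict Int Int)).items

-- ===== PRECONDITION & SPEC =====
def Spec_map_residue_positions (novars : List Int) (pruned_sequence_length : Int) (out : List (Int × Int)) : Prop := out = map_residue_positions_alt novars pruned_sequence_length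
instance (novars : List Int) (pruned_sequence_length : Int) (out : List (Int × Int)) : Decidable (Spec_map_residue_positions novars pruned_sequence_length out) := by unfold Spec_map_residue_positions; infer_instance

-- ===== CLAIM (what is proved, stated in full; the proofs are below) =====
def Claim_equal_map_residue_positions : Prop := ∀ (novars : List Int) (pruned_sequence_length : Int), Dom_map_residue_positions novars pruned_sequence_length → Spec_map_residue_positions novars pruned_sequence_length (map_residue_positions novars pruned_sequence_length)

-- ===== LEMMAS AND PROOFS =====

-- counting elements in [0, c] splits as [0, c) plus the multiplicity of c itself (0 ≤ c)
lemma countP_le_split (l : List Int) (c : Int) (hc : 0 ≤ c) :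
    l.countP (fun x => decide (0 ≤ x ∧ x ≤ c)) =
    l.countP (fun x => decide (0 ≤ x ∧ x < c)) + l.count c := by
  induction l with
  | nil => simp
  | cons a t ih =>
    simp only [List.countP_cons, List.count_cons, ih]
    split_ifs <;> simp only [decide_eq_true_eq, beq_iff_eq] at * <;> omega

-- moving the window [0, c) to [0, c+1) is the same predicate as [0, c]
lemma shift_pred (c : Int) : (fun x : Int => decide (0 ≤ x ∧ x < c + 1)) =
    (fun x : Int => decide (0 ≤ x ∧ x ≤ c)) := by
  funext x; by_cases h : 0 ≤ x ∧ x ≤ c <;> simp_all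

-- the loop invariant of A: with i = counter + #(distinct ∩ [0,counter)) and every key of d
-- below counter, the loop appends exactly the closed-form pairs
lemma mrpLoop_items (distinct : List Int) (hnd : distinct.Nodup) (L : Int) :
    ∀ (fuel : Nat) (counter i : Int) (d : PySem.Dict Int Int),
    fuel = (L - counter).toNat →
    0 ≤ counter →
    i = counter + (distinct.countP (fun x => decide (0 ≤ x ∧ x < counter)) : Int) →
    (∀ k : Int, counter ≤ k → d.contains k = false) →
    (mrpLoop distinct L counter i d).items =
      d.items ++ (PySem.List.pyRange counter L 1).map (fun c =>
        (c, c + (distinct.countP (fun x => decide (0 ≤ x ∧ x ≤ c)) : Int))) := by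
  intro fuel
  induction fuel with
  | zero =>
    intro counter i d hfuel hc hi hd
    have hle : L ≤ counter := by omega
    rw [mrpLoop]
    simp [Int.not_lt.mpr hle, PySem.List.pyRange_one_eq_nil hle]
  | succ n ih =>
    intro counter i d hfuel hc hi hd
    by_cases hlt : counter < L
    · rw [mrpLoop]
      rw [PySem.List.pyRange_one_cons hlt]
      have hfresh : d.contains counter = false := hd counter le_rfl
      have hdnew : ∀ (v : Int) (k : Int), counter + 1 ≤ k →
          (d.insert counter v).contains k = false := by
        intro v k hk
        rw [PySem.Dict.contains_insert]
        have : (k == counter) = false := by simp; omega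
        simp [this, hd k (by omega)]
      have hcount : distinct.countP (fun x => decide (0 ≤ x ∧ x ≤ counter)) =
          distinct.countP (fun x => decide (0 ≤ x ∧ x < counter)) + distinct.count counter :=
        countP_le_split distinct counter hc
      by_cases hmem : counter ∈ distinct
      · have hcnt1 : distinct.count counter = 1 := List.count_eq_one_of_mem hnd hmem
        have hcontains : distinct.contains counter = true := by
          simpa [List.contains_iff_mem] using hmem
        simp only [hlt, dif_pos, hcontains, if_pos]
        rw [ih (counter + 1) (i + 2) _ (by omega) (by omega)
              (by rw [shift_pred, hcount, hcnt1]; push_cast; omega) (hdnew (i + 1)),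
            PySem.Dict.items_insert_of_not_contains _ _ hfresh]
        simp only [List.append_assoc, List.cons_append, List.nil_append, List.map_cons]
        congr 2
        simp only [Prod.mk.injEq, true_and]
        rw [hcount, hcnt1]; push_cast; omega
      · have hcnt0 : distinct.count counter = 0 := List.count_eq_zero.mpr hmem
        have hcontains : distinct.contains counter = false := by
          simpa [List.contains_iff_mem] using hmem
        simp only [hlt, dif_pos, hcontains, Bool.false_eq_true, if_false]
        rw [ih (counter + 1) (i + 1) _ (by omega) (by omega)
              (by rw [shift_pred, hcount, hcnt0]; push_cast; omega) (hdnew i),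
            PySem.Dict.items_insert_of_not_contains _ _ hfresh]
        simp only [List.append_assoc, List.cons_append, List.nil_append, List.map_cons]
        congr 2
        simp only [Prod.mk.injEq, true_and]
        rw [hcount, hcnt0]; push_cast; omega
    · rw [mrpLoop]
      simp [hlt, PySem.List.pyRange_one_eq_nil (by omega : L ≤ counter)]

-- a boundary r with everything below ≤ c and everything from r on > c pins down countP (· ≤ c)
lemma countP_boundary (c : Int) : ∀ (s : List Int) (r : Nat), r ≤ s.length →
    (∀ j (_ : j < s.length), j < r → s[j] ≤ c) →
    (∀ j (_ : j < s.length), r ≤ j → c < s[j]) →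
    s.countP (fun x => decide (x ≤ c)) = r := by
  intro s
  induction s with
  | nil => intro r hr _ _; simp at hr ⊢; omega
  | cons a t ih =>
    intro r hr hlo hhi
    cases r with
    | zero =>
      have ha : c < a := hhi 0 (by simp) (by omega)
      have ht : t.countP (fun x => decide (x ≤ c)) = 0 :=
        ih 0 (by omega) (by omega)
          (fun j hj _ => by
            simpa using hhi (j + 1) (by simp only [List.length_cons]; omega) (by omega))
      simp [ht, not_le.mpr ha]
    | succ r' =>
      have ha : a ≤ c := hlo 0 (by simp) (by omega)
      have ht : t.countP (fun x => decide (x ≤ c)) = r' :=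
        ih r' (by simp only [List.length_cons] at hr; omega)
          (fun j hj hjr => by
            simpa using hlo (j + 1) (by simp only [List.length_cons]; omega) (by omega))
          (fun j hj hjr => by
            simpa using hhi (j + 1) (by simp only [List.length_cons]; omega) (by omega))
      simp [ht, ha]

-- the binary-search invariant: on a ≤-sorted list, with everything below lo already ≤ c and
-- everything from hi on already > c, the loop computes the count of elements ≤ c
lemma rankLoop_count (s : List Int) (c : Int) (hs : s.Pairwise (· ≤ ·)) :
    ∀ (fuel : Nat) (lo hi : Int),
    (hi - lo).toNat ≤ fuel → 0 ≤ lo → lo ≤ hi → hi ≤ (s.length : Int) →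
    (∀ j (_ : j < s.length), (j : Int) < lo → s[j] ≤ c) →
    (∀ j (_ : j < s.length), hi ≤ (j : Int) → c < s[j]) →
    rankLoop s c lo hi = (s.countP (fun x => decide (x ≤ c)) : Int) := by
  have hmono := List.pairwise_iff_getElem.mp hs
  intro fuel
  induction fuel with
  | zero =>
    intro lo hi hfuel h0 hlh hhl hlo hhi
    have heq : lo = hi := by omega
    rw [rankLoop]
    have hnl : ¬ lo < hi := by omega
    rw [dif_neg hnl]
    rw [countP_boundary c s lo.toNat (by omega)
      (fun j hj hjr => hlo j hj (by omega)) (fun j hj hjr => hhi j hj (by omega))]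
    omega
  | succ n ih =>
    intro lo hi hfuel h0 hlh hhl hlo hhi
    by_cases hlt : lo < hi
    · rw [rankLoop, dif_pos hlt]
      set mid := PySem.Int.floordiv (lo + hi) 2 with hmid
      have hb := PySem.Int.floordiv_two_mid_bounds (le_of_lt hlt)
      have hmlt : mid < hi := (PySem.Int.floordiv_lt_iff_lt_mul (by omega)).mpr (by omega)
      have hmrange : mid.toNat < s.length := by omega
      have hget : PySem.List.pyGetD s mid 0 = s[mid.toNat] :=
        PySem.List.pyGetD_eq_getElem s 0 (by omega) (by omega)
      by_cases hcmp : PySem.List.pyGetD s mid 0 ≤ c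
      · rw [if_pos hcmp]
        refine ih (mid + 1) hi (by omega) (by omega) (by omega) hhl ?_ hhi
        intro j hj hjlt
        by_cases hjm : j = mid.toNat
        · subst hjm; exact hget ▸ hcmp
        · exact le_trans (hmono j mid.toNat hj hmrange (by omega)) (hget ▸ hcmp)
      · rw [if_neg hcmp]
        refine ih lo mid (by omega) h0 (by omega) (by omega) hlo ?_
        intro j hj hjge
        have hc : c < s[mid.toNat] := by
          have := lt_of_not_ge hcmp
          rwa [hget] at this
        by_cases hjm : mid.toNat < j
        · exact lt_of_lt_of_le hc (hmono mid.toNat j hmrange hj hjm)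
        · have : j = mid.toNat := by omega
          subst this; exact hc
    · rw [rankLoop, dif_neg hlt]
      rw [countP_boundary c s lo.toNat (by omega)
        (fun j hj hjr => hlo j hj (by omega)) (fun j hj hjr => hhi j hj (by omega))]
      omega

-- B's dict comprehension over nodup keys appends exactly the mapped pairs
lemma items_foldl_insert (f : Int → Int) :
    ∀ (xs : List Int) (d : PySem.Dict Int Int), xs.Nodup →
    (∀ k ∈ xs, d.contains k = false) →
    ((xs.foldl (fun d c => d.insert c (f c)) d).items) = d.items ++ xs.map (fun c => (c, f c)) := by
  intro xs
  induction xs with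
  | nil => intro d _ _; simp
  | cons a t ih =>
    intro d hnd hfresh
    have hfa : d.contains a = false := hfresh a (by simp)
    have hrest : ∀ k ∈ t, (d.insert a (f a)).contains k = false := by
      intro k hk
      rw [PySem.Dict.contains_insert]
      have : (k == a) = false := by
        simp only [beq_eq_false_iff_ne, ne_eq]
        intro h; exact (List.nodup_cons.mp hnd).1 (h ▸ hk)
      simp [this, hfresh k (by simp [hk])]
    simp only [List.foldl_cons, List.map_cons]
    rw [ih _ (List.nodup_cons.mp hnd).2 hrest,
        PySem.Dict.items_insert_of_not_contains _ _ hfa]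
    simp

-- ===== VERDICT (by name: the statement is the Claim_ definition above) =====
theorem map_residue_positions_spec : Claim_equal_map_residue_positions := by
  intro novars L _
  unfold Spec_map_residue_positions map_residue_positions map_residue_positions_alt
  set base := PySem.Set.ofList novars with hbase
  set distinct := PySem.List.sorted base (fun x => x) false with hdist
  set s := PySem.List.sorted (base.filter (fun x => decide (0 ≤ x))) (fun x => x) false with hs
  have hperm : distinct.Perm base := PySem.List.sorted_perm base (fun x => x) false
  have hnds : base.Nodup := PySem.Set.nodup_ofList novars
  have hnd : distinct.Nodup := hperm.nodup_iff.mpr hnds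
  have hsperm : s.Perm (base.filter (fun x => decide (0 ≤ x))) :=
    PySem.List.sorted_perm _ (fun x => x) false
  have hssorted : s.Pairwise (· ≤ ·) := PySem.List.sorted_pairwise _ (fun x => x)
  have h0 : (fun x : Int => decide (0 ≤ x ∧ x < 0)) = (fun _ : Int => false) := by
    funext x; simp
  rw [mrpLoop_items distinct hnd L (L - 0).toNat 0 0 PySem.Dict.empty rfl le_rfl
        (by rw [h0]; simp) (fun k _ => PySem.Dict.contains_empty k),
      items_foldl_insert _ (PySem.List.pyRange 0 L 1) PySem.Dict.empty
        (PySem.List.nodup_pyRange_one 0 L) (fun k _ => PySem.Dict.contains_empty k)]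
  simp only [PySem.Dict.empty, List.nil_append]
  apply List.map_congr_left
  intro c hc
  have hcpos : 0 ≤ c := ((PySem.List.mem_pyRange_one).mp hc).1
  have hrank : rankLoop s c 0 (s.length : Int) =
      (s.countP (fun x => decide (x ≤ c)) : Int) :=
    rankLoop_count s c hssorted s.length 0 (s.length : Int) (by omega) le_rfl
      (by omega) le_rfl (fun j _ h => absurd h (by omega))
      (fun j hj h => absurd h (by omega))
  rw [hrank]
  have hcount : s.countP (fun x => decide (x ≤ c)) =
      distinct.countP (fun x => decide (0 ≤ x ∧ x ≤ c)) := by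
    rw [hsperm.countP_eq, List.countP_filter, hperm.countP_eq]
    apply List.countP_congr
    intro x _
    by_cases hx : 0 ≤ x ∧ x ≤ c <;> simp [hx] <;> omega
  rw [hcount]
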